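-- pv_equiv track=rewrite | github.com/MattMichaud/AoC | 2018/2018_22.py | part1
-- ===== SOURCE A (Python) =====
-- def build_cave(depth, target, max_size=None):
--     cave = {}
--
--     if max_size is None:
--         max_size = target
--
--     for i in range(0, max_size[0] + 1):
--         for j in range(0, max_size[1] + 1):
--             if i == target[0] and j == target[1]:
--                 cave[i, j] = {'index': 0}
--             elif i == 0:
--                 cave[i, j] = {'index': 48271 * j}
--             elif j == 0:
--                 cave[i, j] = {'index': 16807 * i}
--             else:
--                 cave[i, j] = {'index': cave[i-1, j]['level'] * cave[i, j-1]['level']}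
--
--             cave[i, j]['level'] = (cave[i, j]['index'] + depth) % 20183
--             cave[i, j]['erosion'] = cave[i,j]['level'] % 3
--
--     return cave
--
-- def part1(depth, target):
--     cave = build_cave(depth, target)
--     res = sum(
--         cave[i, j]['erosion']
--         for i in range(target[0] + 1)
--         for j in range(target[1] + 1)
--     )
--     return res
-- ===== SOURCE B (Python) =====
-- def part1(depth, target):
--     # Anti-diagonal wavefront: sweep the grid by diagonals i+j = d, keeping only
--     # the previous diagonal's erosion levels (keyed by row i) and a running total.
--     ti, tj = target
--     if ti < 0 or tj < 0:
--         return 0  # empty region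
--     total = 0
--     prev = {}
--     for d in range(ti + tj + 1):
--         cur = {}
--         for i in range(max(0, d - tj), min(d, ti) + 1):
--             j = d - i
--             if i == ti and j == tj:
--                 g = 0
--             elif i == 0:
--                 g = 48271 * j
--             elif j == 0:
--                 g = 16807 * i
--             else:
--                 g = prev[i - 1] * prev[i]
--             level = (g + depth) % 20183
--             total += level % 3
--             cur[i] = level
--         prev = cur
--     return total
-- ===== Notes on version B (the rewrite author's own statement) =====
-- stated objective: alternative
-- what changed: Replaces A's row-major full-grid dict-of-dicts (built first, then summed in a second nested pass) by an anti-diagonal wavefront sweep: cells are visited in order of i+j, only the previous diagonal's erosion levels (a dict keyed by row) are kept, and the risk total is accumulated inline; correctness rests on each cell depending only on its up/left neighbours, which lie on the previous diagonal.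
import Mathlib
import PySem

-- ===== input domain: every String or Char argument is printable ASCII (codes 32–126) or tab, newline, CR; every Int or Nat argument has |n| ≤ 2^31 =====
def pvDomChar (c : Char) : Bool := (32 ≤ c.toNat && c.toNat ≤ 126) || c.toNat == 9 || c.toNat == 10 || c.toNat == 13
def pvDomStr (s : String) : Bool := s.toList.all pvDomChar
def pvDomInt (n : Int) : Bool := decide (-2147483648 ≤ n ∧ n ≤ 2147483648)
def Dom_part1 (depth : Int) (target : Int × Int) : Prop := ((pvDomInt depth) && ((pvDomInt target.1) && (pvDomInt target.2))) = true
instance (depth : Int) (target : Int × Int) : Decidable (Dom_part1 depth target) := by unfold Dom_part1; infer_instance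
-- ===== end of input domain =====

-- B replaces A's row-major full-grid dict (built, then summed in a second pass) by an
-- anti-diagonal wavefront sweep keeping only the previous diagonal's levels (objective: alternative).

-- ===== PORT A =====
-- build_cave: dict keyed by (i, j), values are dicts {'index','level','erosion'}.
-- The outer dict is only ever read/written per key and never iterated, so it is ported
-- as a hash map with the same per-key lookup/overwrite semantics as the Python dict.
-- cave[...] lookups use getD with an unused default: on every executed read the key
-- is present (cells (i-1,j) and (i,j-1) are written before they are read), so this is exact.
def buildCave (depth : Int) (target maxSize : Int × Int) : Std.HashMap (Int × Int) (PySem.Dict String Int) :=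
  (PySem.List.pyRange 0 (maxSize.1 + 1) 1).foldl (fun cave i =>
    (PySem.List.pyRange 0 (maxSize.2 + 1) 1).foldl (fun cave j =>
      let idx : Int :=
        if i = target.1 ∧ j = target.2 then 0
        else if i = 0 then 48271 * j
        else if j = 0 then 16807 * i
        else (cave.getD (i - 1, j) PySem.Dict.empty).getD "level" 0 *
             (cave.getD (i, j - 1) PySem.Dict.empty).getD "level" 0
      let inner := PySem.Dict.ofList [("index", idx)]
      let inner := inner.insert "level" (PySem.Int.mod (inner.getD "index" 0 + depth) 20183)
      let inner := inner.insert "erosion" (PySem.Int.mod (inner.getD "level" 0) 3)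
      cave.insert (i, j) inner) cave) ∅

def part1 (depth : Int) (target : Int × Int) : Int :=
  let cave := buildCave depth target target
  (PySem.List.pyRange 0 (target.1 + 1) 1).foldl (fun res i =>
    (PySem.List.pyRange 0 (target.2 + 1) 1).foldl (fun res j =>
      res + (cave.getD (i, j) PySem.Dict.empty).getD "erosion" 0) res) 0

-- ===== PORT B =====
-- prev[i-1] / prev[i] are read only when those keys are present (the neighbours lie on
-- the previous diagonal's range), so getD's default is never used: exact.
def part1_alt (depth : Int) (target : Int × Int) : Int :=
  let ti := target.1
  let tj := target.2
  if ti < 0 ∨ tj < 0 then 0 else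
  let st := (PySem.List.pyRange 0 (ti + tj + 1) 1).foldl
    (fun (st : PySem.Dict Int Int × Int) d =>
      (PySem.List.pyRange (max 0 (d - tj)) (min d ti + 1) 1).foldl
        (fun (s : PySem.Dict Int Int × Int) i =>
          let j := d - i
          let g : Int :=
            if i = ti ∧ j = tj then 0
            else if i = 0 then 48271 * j
            else if j = 0 then 16807 * i
            else st.1.getD (i - 1) 0 * st.1.getD i 0
          let level := PySem.Int.mod (g + depth) 20183
          (s.1.insert i level, s.2 + PySem.Int.mod level 3))
        (PySem.Dict.empty, st.2))
    (PySem.Dict.empty, 0)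
  st.2

-- ===== PRECONDITION & SPEC =====
def Spec_part1 (depth : Int) (target : Int × Int) (out : Int) : Prop := out = part1_alt depth target
instance (depth : Int) (target : Int × Int) (out : Int) : Decidable (Spec_part1 depth target out) := by unfold Spec_part1; infer_instance

-- ===== CLAIM (what is proved, stated in full; the proofs are below) =====
def Claim_equal_part1 : Prop := ∀ (depth : Int) (target : Int × Int), Dom_part1 depth target → Spec_part1 depth target (part1 depth target)

-- ===== LEMMAS AND PROOFS =====

-- Mathematical erosion level of cell (i, j) (Nat coordinates).
def L (depth ti tj : Int) : Nat → Nat → Int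
  | 0, j => if ((0 : Nat) : Int) = ti ∧ (j : Int) = tj then PySem.Int.mod (0 + depth) 20183
            else PySem.Int.mod (48271 * (j : Int) + depth) 20183
  | (i+1), 0 => if ((i + 1 : Nat) : Int) = ti ∧ ((0 : Nat) : Int) = tj then PySem.Int.mod (0 + depth) 20183
            else PySem.Int.mod (16807 * ((i + 1 : Nat) : Int) + depth) 20183
  | (i+1), (j+1) => if ((i + 1 : Nat) : Int) = ti ∧ ((j + 1 : Nat) : Int) = tj then PySem.Int.mod (0 + depth) 20183
            else PySem.Int.mod (L depth ti tj i (j+1) * L depth ti tj (i+1) j + depth) 20183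
termination_by i j => i + j

-- Int-coordinate version.
def lev (depth ti tj i j : Int) : Int := L depth ti tj i.toNat j.toNat

def gI (depth ti tj i j : Int) : Int :=
  if i = ti ∧ j = tj then 0
  else if i = 0 then 48271 * j
  else if j = 0 then 16807 * i
  else lev depth ti tj (i - 1) j * lev depth ti tj i (j - 1)

lemma lev_eq (depth ti tj i j : Int) (hi : 0 ≤ i) (hj : 0 ≤ j) :
    lev depth ti tj i j = PySem.Int.mod (gI depth ti tj i j + depth) 20183 := by
  obtain ⟨a, rfl⟩ := Int.eq_ofNat_of_zero_le hi
  obtain ⟨b, rfl⟩ := Int.eq_ofNat_of_zero_le hj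
  unfold lev gI
  have e1 : ∀ n : Nat, ((n : Int)).toNat = n := fun n => Int.toNat_natCast n
  cases a with
  | zero =>
    cases b with
    | zero => simp only [e1, L]; split_ifs <;> first | rfl | (exfalso; omega)
    | succ b =>
      simp only [e1, L]
      split_ifs <;> first | rfl | (exfalso; omega)
  | succ a =>
    cases b with
    | zero =>
      simp only [e1, L]
      split_ifs <;> first | rfl | (exfalso; omega)
    | succ b =>
      have ha : ((a + 1 : Nat) : Int) - 1 = ((a : Nat) : Int) := by push_cast; ring
      have hb : ((b + 1 : Nat) : Int) - 1 = ((b : Nat) : Int) := by push_cast; ring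
      simp only [L, lev, ha, hb, e1]
      split_ifs <;> first | rfl | (exfalso; omega)

def cellD (depth ti tj i j : Int) : PySem.Dict String Int :=
  ((PySem.Dict.ofList [("index", gI depth ti tj i j)]).insert "level" (lev depth ti tj i j)).insert
    "erosion" (PySem.Int.mod (lev depth ti tj i j) 3)

lemma cellD_level (depth ti tj i j : Int) :
    (cellD depth ti tj i j).getD "level" 0 = lev depth ti tj i j := by
  unfold cellD
  rw [PySem.Dict.getD_insert_of_ne (hne := by decide), PySem.Dict.getD_insert_self]

lemma cellD_erosion (depth ti tj i j : Int) :
    (cellD depth ti tj i j).getD "erosion" 0 = PySem.Int.mod (lev depth ti tj i j) 3 := by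
  unfold cellD
  rw [PySem.Dict.getD_insert_self]

-- ---- A-side invariants ----
def stepA (depth : Int) (t : Int × Int) (i : Int)
    (cave : Std.HashMap (Int × Int) (PySem.Dict String Int)) (j : Int) :
    Std.HashMap (Int × Int) (PySem.Dict String Int) :=
  let idx : Int :=
    if i = t.1 ∧ j = t.2 then 0
    else if i = 0 then 48271 * j
    else if j = 0 then 16807 * i
    else (cave.getD (i - 1, j) PySem.Dict.empty).getD "level" 0 *
         (cave.getD (i, j - 1) PySem.Dict.empty).getD "level" 0
  let inner := PySem.Dict.ofList [("index", idx)]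
  let inner := inner.insert "level" (PySem.Int.mod (inner.getD "index" 0 + depth) 20183)
  let inner := inner.insert "erosion" (PySem.Int.mod (inner.getD "level" 0) 3)
  cave.insert (i, j) inner

lemma buildCave_eq (depth : Int) (t ms : Int × Int) :
    buildCave depth t ms =
      (PySem.List.pyRange 0 (ms.1 + 1) 1).foldl
        (fun cave i => (PySem.List.pyRange 0 (ms.2 + 1) 1).foldl (stepA depth t i) cave)
        ∅ := rfl

lemma stepA_eq (depth : Int) (t : Int × Int) (i j : Int)
    (cave : Std.HashMap (Int × Int) (PySem.Dict String Int)) (hi : 0 ≤ i) (hj : 0 ≤ j)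
    (hup : i ≠ 0 → (cave.getD (i - 1, j) PySem.Dict.empty).getD "level" 0 = lev depth t.1 t.2 (i - 1) j)
    (hleft : j ≠ 0 → (cave.getD (i, j - 1) PySem.Dict.empty).getD "level" 0 = lev depth t.1 t.2 i (j - 1)) :
    stepA depth t i cave j = cave.insert (i, j) (cellD depth t.1 t.2 i j) := by
  unfold stepA cellD
  have hidx : (if i = t.1 ∧ j = t.2 then (0 : Int)
      else if i = 0 then 48271 * j
      else if j = 0 then 16807 * i
      else (cave.getD (i - 1, j) PySem.Dict.empty).getD "level" 0 *
           (cave.getD (i, j - 1) PySem.Dict.empty).getD "level" 0)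
      = gI depth t.1 t.2 i j := by
    unfold gI
    split_ifs with h1 h2 h3
    · rfl
    · rfl
    · rfl
    · rw [hup h2, hleft h3]
  simp only [hidx]
  have hgetidx : (PySem.Dict.ofList [("index", gI depth t.1 t.2 i j)]).getD "index" 0
      = gI depth t.1 t.2 i j := by
    simp [PySem.Dict.ofList, PySem.Dict.update]
  rw [hgetidx, PySem.Dict.getD_insert_self, ← lev_eq depth t.1 t.2 i j hi hj]

lemma rowA_inv (depth : Int) (t : Int × Int) (i m : Int)
    (cave : Std.HashMap (Int × Int) (PySem.Dict String Int)) (hi : 0 ≤ i)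
    (hup : i ≠ 0 → ∀ j : Int, 0 ≤ j → j < m →
      (cave.getD (i - 1, j) PySem.Dict.empty).getD "level" 0 = lev depth t.1 t.2 (i - 1) j) :
    ∀ k : Nat, (k : Int) ≤ m →
      (∀ j : Int, 0 ≤ j → j < (k : Int) →
        (((PySem.List.pyRange 0 (k : Int) 1).foldl (stepA depth t i) cave).getD (i, j) PySem.Dict.empty)
          = cellD depth t.1 t.2 i j)
      ∧ (∀ p : Int × Int, p.1 ≠ i →
        (((PySem.List.pyRange 0 (k : Int) 1).foldl (stepA depth t i) cave).getD p PySem.Dict.empty)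
          = cave.getD p PySem.Dict.empty) := by
  intro k
  induction k with
  | zero =>
    intro _
    constructor
    · intro j hj hjk; exfalso; omega
    · intro p _; rfl
  | succ k ih =>
    intro hk1
    have hk : (k : Int) ≤ m := by push_cast at hk1 ⊢; omega
    obtain ⟨ih1, ih2⟩ := ih hk
    have hcast : ((k + 1 : Nat) : Int) = (k : Int) + 1 := by push_cast; ring
    have hsplit : PySem.List.pyRange 0 ((k + 1 : Nat) : Int) 1
        = PySem.List.pyRange 0 (k : Int) 1 ++ [(k : Int)] := by
      rw [hcast, PySem.List.pyRange_one_succ_right (by omega)]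
    rw [hsplit, List.foldl_append, List.foldl_cons, List.foldl_nil]
    have hstep : stepA depth t i ((PySem.List.pyRange 0 (k : Int) 1).foldl (stepA depth t i) cave) (k : Int)
        = ((PySem.List.pyRange 0 (k : Int) 1).foldl (stepA depth t i) cave).insert (i, (k : Int))
            (cellD depth t.1 t.2 i (k : Int)) := by
      apply stepA_eq depth t i (k : Int) _ hi (Int.natCast_nonneg k)
      · intro hne0
        rw [ih2 (i - 1, (k : Int)) (by simp)]
        exact hup hne0 (k : Int) (Int.natCast_nonneg k) (by omega)
      · intro hkne0
        rw [ih1 ((k : Int) - 1) (by omega) (by omega)]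
        exact cellD_level depth t.1 t.2 i ((k : Int) - 1)
    rw [hstep]
    constructor
    · intro j hj hjk
      by_cases hjeq : j = (k : Int)
      · subst hjeq; rw [Std.HashMap.getD_insert_self]
      · rw [Std.HashMap.getD_insert, if_neg (by intro hcontr; simp [Prod.ext_iff] at hcontr; omega)]
        exact ih1 j hj (by omega)
    · intro p hp
      rw [Std.HashMap.getD_insert, if_neg (by intro hcontr; simp [Prod.ext_iff] at hcontr; exact hp hcontr.1.symm)]
      exact ih2 p hp

lemma caveA_inv (depth : Int) (t : Int × Int) :
    ∀ k : Nat, (k : Int) ≤ t.1 + 1 → ∀ i j : Int, 0 ≤ i → i < (k : Int) → 0 ≤ j → j < t.2 + 1 →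
      (((PySem.List.pyRange 0 (k : Int) 1).foldl
          (fun cave i => (PySem.List.pyRange 0 (t.2 + 1) 1).foldl (stepA depth t i) cave)
          ∅).getD (i, j) PySem.Dict.empty)
        = cellD depth t.1 t.2 i j := by
  intro k
  induction k with
  | zero => intro _ i j _ hik _ _; exfalso; omega
  | succ k ih =>
    intro hk1 i j hi hik hj hjlt
    have hk : (k : Int) ≤ t.1 + 1 := by push_cast at hk1 ⊢; omega
    have hcast : ((k + 1 : Nat) : Int) = (k : Int) + 1 := by push_cast; ring
    have hsplit : PySem.List.pyRange 0 ((k + 1 : Nat) : Int) 1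
        = PySem.List.pyRange 0 (k : Int) 1 ++ [(k : Int)] := by
      rw [hcast, PySem.List.pyRange_one_succ_right (by omega)]
    rw [hsplit, List.foldl_append, List.foldl_cons, List.foldl_nil]
    have h2 : 0 ≤ t.2 + 1 := by omega
    have hr : (((t.2 + 1).toNat : Int)) = t.2 + 1 := Int.toNat_of_nonneg h2
    have hupC : (k : Int) ≠ 0 → ∀ j' : Int, 0 ≤ j' → j' < t.2 + 1 →
        ((((PySem.List.pyRange 0 (k : Int) 1).foldl
            (fun cave i => (PySem.List.pyRange 0 (t.2 + 1) 1).foldl (stepA depth t i) cave)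
            ∅).getD ((k : Int) - 1, j') PySem.Dict.empty).getD "level" 0)
          = lev depth t.1 t.2 ((k : Int) - 1) j' := by
      intro hkne j' hj0 hjlt'
      rw [ih hk ((k : Int) - 1) j' (by omega) (by omega) hj0 hjlt']
      exact cellD_level depth t.1 t.2 ((k : Int) - 1) j'
    obtain ⟨r1, r2⟩ := rowA_inv depth t (k : Int) (t.2 + 1) _ (Int.natCast_nonneg k) hupC
      ((t.2 + 1).toNat) (by rw [hr])
    rw [hr] at r1 r2
    by_cases hik' : i = (k : Int)
    · subst hik'; exact r1 j hj hjlt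
    · rw [r2 (i, j) (by simpa using hik')]
      exact ih hk i j hi (by omega) hj hjlt

lemma part1_eq_S (depth : Int) (t : Int × Int) :
    part1 depth t =
      ((PySem.List.pyRange 0 (t.1 + 1) 1).map (fun i =>
        ((PySem.List.pyRange 0 (t.2 + 1) 1).map (fun j =>
          PySem.Int.mod (lev depth t.1 t.2 i j) 3)).sum)).sum := by
  have hmain : ∀ i ∈ PySem.List.pyRange 0 (t.1 + 1) 1, ∀ j ∈ PySem.List.pyRange 0 (t.2 + 1) 1,
      (buildCave depth t t).getD (i, j) PySem.Dict.empty = cellD depth t.1 t.2 i j := by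
    intro i hi j hj
    rw [PySem.List.mem_pyRange_one] at hi hj
    rw [buildCave_eq]
    have h1 : ((t.1 + 1).toNat : Int) = t.1 + 1 := Int.toNat_of_nonneg (by omega)
    have h := caveA_inv depth t ((t.1 + 1).toNat) (by rw [h1]) i j hi.1 (by rw [h1]; exact hi.2)
      hj.1 hj.2
    rwa [h1] at h
  have hin : ∀ i ∈ PySem.List.pyRange 0 (t.1 + 1) 1, ∀ acc : Int,
      (PySem.List.pyRange 0 (t.2 + 1) 1).foldl
        (fun res j => res + ((buildCave depth t t).getD (i, j) PySem.Dict.empty).getD "erosion" 0) acc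
      = acc + ((PySem.List.pyRange 0 (t.2 + 1) 1).map
          (fun j => PySem.Int.mod (lev depth t.1 t.2 i j) 3)).sum := by
    intro i hi acc
    have hcong : ∀ (acc2 j : Int), j ∈ PySem.List.pyRange 0 (t.2 + 1) 1 →
        acc2 + ((buildCave depth t t).getD (i, j) PySem.Dict.empty).getD "erosion" 0
        = acc2 + PySem.Int.mod (lev depth t.1 t.2 i j) 3 := by
      intro acc2 j hj
      rw [hmain i hi j hj, cellD_erosion]
    exact (PySem.List.foldl_congr_mem _ _
      (fun res j => res + PySem.Int.mod (lev depth t.1 t.2 i j) 3) acc hcong).trans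
      (PySem.List.foldl_add _ _ _)
  show (PySem.List.pyRange 0 (t.1 + 1) 1).foldl (fun res i =>
      (PySem.List.pyRange 0 (t.2 + 1) 1).foldl
        (fun res j => res + ((buildCave depth t t).getD (i, j) PySem.Dict.empty).getD "erosion" 0) res) 0 = _
  have hcong2 : ∀ (acc i : Int), i ∈ PySem.List.pyRange 0 (t.1 + 1) 1 →
      (PySem.List.pyRange 0 (t.2 + 1) 1).foldl
        (fun res j => res + ((buildCave depth t t).getD (i, j) PySem.Dict.empty).getD "erosion" 0) acc
      = acc + ((PySem.List.pyRange 0 (t.2 + 1) 1).map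
          (fun j => PySem.Int.mod (lev depth t.1 t.2 i j) 3)).sum := fun acc i hi => hin i hi acc
  exact (PySem.List.foldl_congr_mem _ _
    (fun res i => res + ((PySem.List.pyRange 0 (t.2 + 1) 1).map
      (fun j => PySem.Int.mod (lev depth t.1 t.2 i j) 3)).sum) 0 hcong2).trans
    (by rw [PySem.List.foldl_add, zero_add])

-- ---- B-side invariants (anti-diagonal sweep) ----
def stepD (depth ti tj d : Int) (prev : PySem.Dict Int Int)
    (s : PySem.Dict Int Int × Int) (i : Int) : PySem.Dict Int Int × Int :=
  let j := d - i
  let g : Int :=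
    if i = ti ∧ j = tj then 0
    else if i = 0 then 48271 * j
    else if j = 0 then 16807 * i
    else prev.getD (i - 1) 0 * prev.getD i 0
  let level := PySem.Int.mod (g + depth) 20183
  (s.1.insert i level, s.2 + PySem.Int.mod level 3)

def outerD (depth ti tj : Int) (st : PySem.Dict Int Int × Int) (d : Int) : PySem.Dict Int Int × Int :=
  (PySem.List.pyRange (max 0 (d - tj)) (min d ti + 1) 1).foldl (stepD depth ti tj d st.1)
    (PySem.Dict.empty, st.2)

lemma part1_alt_eq (depth : Int) (t : Int × Int) (h : ¬(t.1 < 0 ∨ t.2 < 0)) :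
    part1_alt depth t =
      ((PySem.List.pyRange 0 (t.1 + t.2 + 1) 1).foldl (outerD depth t.1 t.2)
        (PySem.Dict.empty, 0)).2 := by
  simp only [part1_alt]
  rw [if_neg h]
  rfl

lemma part1_alt_eq_zero (depth : Int) (t : Int × Int) (h : t.1 < 0 ∨ t.2 < 0) :
    part1_alt depth t = 0 := by
  simp only [part1_alt]
  rw [if_pos h]

lemma diagB_inv (depth ti tj d : Int) (prev : PySem.Dict Int Int) (t0 : Int) (hd : 0 ≤ d)
    (hprev : ∀ i' : Int, max 0 (d - 1 - tj) ≤ i' → i' ≤ min (d - 1) ti →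
      prev.getD i' 0 = lev depth ti tj i' (d - 1 - i')) :
    ∀ k : Nat, max 0 (d - tj) + (k : Int) ≤ min d ti + 1 →
      ((PySem.List.pyRange (max 0 (d - tj)) (max 0 (d - tj) + (k : Int)) 1).foldl
          (stepD depth ti tj d prev) (PySem.Dict.empty, t0)).2
        = t0 + ((PySem.List.pyRange (max 0 (d - tj)) (max 0 (d - tj) + (k : Int)) 1).map
            (fun i => PySem.Int.mod (lev depth ti tj i (d - i)) 3)).sum
      ∧ ∀ i' : Int, max 0 (d - tj) ≤ i' → i' < max 0 (d - tj) + (k : Int) →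
        ((PySem.List.pyRange (max 0 (d - tj)) (max 0 (d - tj) + (k : Int)) 1).foldl
            (stepD depth ti tj d prev) (PySem.Dict.empty, t0)).1.getD i' 0
          = lev depth ti tj i' (d - i') := by
  intro k
  induction k with
  | zero =>
    intro _
    have hnil : PySem.List.pyRange (max 0 (d - tj)) (max 0 (d - tj) + ((0 : Nat) : Int)) 1 = [] :=
      PySem.List.pyRange_one_eq_nil (by omega)
    rw [hnil]
    constructor
    · simp
    · intro i' h1 h2; exfalso; omega
  | succ k ih =>
    intro hk1
    have hk : max 0 (d - tj) + (k : Int) ≤ min d ti + 1 := by push_cast at hk1 ⊢; omega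
    obtain ⟨ih1, ih2⟩ := ih hk
    have hcast : max 0 (d - tj) + ((k + 1 : Nat) : Int) = (max 0 (d - tj) + (k : Int)) + 1 := by
      push_cast; ring
    have hsplit : PySem.List.pyRange (max 0 (d - tj)) (max 0 (d - tj) + ((k + 1 : Nat) : Int)) 1
        = PySem.List.pyRange (max 0 (d - tj)) (max 0 (d - tj) + (k : Int)) 1
            ++ [max 0 (d - tj) + (k : Int)] := by
      rw [hcast, PySem.List.pyRange_one_succ_right (by omega)]
    set i : Int := max 0 (d - tj) + (k : Int) with hidef
    have hstep : ∀ s : PySem.Dict Int Int × Int, stepD depth ti tj d prev s i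
        = (s.1.insert i (lev depth ti tj i (d - i)),
           s.2 + PySem.Int.mod (lev depth ti tj i (d - i)) 3) := by
      intro s
      unfold stepD
      have hg : (if i = ti ∧ d - i = tj then (0 : Int)
          else if i = 0 then 48271 * (d - i)
          else if d - i = 0 then 16807 * i
          else prev.getD (i - 1) 0 * prev.getD i 0) = gI depth ti tj i (d - i) := by
        unfold gI
        split_ifs with h1 h2 h3
        · rfl
        · rfl
        · rfl
        · rw [hprev (i - 1) (by omega) (by omega), hprev i (by omega) (by omega)]
          have e1 : d - 1 - (i - 1) = d - i := by ring
          have e2 : d - 1 - i = d - i - 1 := by ring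
          rw [e1, e2]
      simp only [hg, ← lev_eq depth ti tj i (d - i) (by omega) (by omega)]
    rw [hsplit, List.foldl_append, List.foldl_cons, List.foldl_nil, hstep]
    constructor
    · rw [List.map_append, List.sum_append]
      simp only [List.map_cons, List.map_nil, List.sum_cons, List.sum_nil]
      rw [ih1]
      ring
    · intro i' h1 h2
      by_cases hie : i' = i
      · subst hie; rw [PySem.Dict.getD_insert_self]
      · rw [PySem.Dict.getD_insert_of_ne (hne := by simpa using fun h => hie h)]
        exact ih2 i' h1 (by omega)

lemma outerD_inv (depth ti tj : Int) :
    ∀ m : Nat, (m : Int) ≤ ti + tj + 1 →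
      ((PySem.List.pyRange 0 (m : Int) 1).foldl (outerD depth ti tj) (PySem.Dict.empty, 0)).2
        = ((PySem.List.pyRange 0 (m : Int) 1).map (fun d =>
            ((PySem.List.pyRange (max 0 (d - tj)) (min d ti + 1) 1).map
              (fun i => PySem.Int.mod (lev depth ti tj i (d - i)) 3)).sum)).sum
      ∧ ∀ i' : Int, max 0 ((m : Int) - 1 - tj) ≤ i' → i' ≤ min ((m : Int) - 1) ti →
        ((PySem.List.pyRange 0 (m : Int) 1).foldl (outerD depth ti tj)
            (PySem.Dict.empty, 0)).1.getD i' 0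
          = lev depth ti tj i' ((m : Int) - 1 - i') := by
  intro m
  induction m with
  | zero =>
    intro _
    rw [show PySem.List.pyRange 0 ((0 : Nat) : Int) 1 = [] from
      PySem.List.pyRange_one_eq_nil (by simp)]
    constructor
    · simp
    · intro i' h1 h2; exfalso; omega
  | succ m ih =>
    intro hm1
    have hm : (m : Int) ≤ ti + tj + 1 := by push_cast at hm1 ⊢; omega
    obtain ⟨ih1, ih2⟩ := ih hm
    have hcast : ((m + 1 : Nat) : Int) = (m : Int) + 1 := by push_cast; ring
    have hsplit : PySem.List.pyRange 0 ((m + 1 : Nat) : Int) 1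
        = PySem.List.pyRange 0 (m : Int) 1 ++ [(m : Int)] := by
      rw [hcast, PySem.List.pyRange_one_succ_right (by omega)]
    rw [hsplit, List.foldl_append, List.foldl_cons, List.foldl_nil]
    set R := (PySem.List.pyRange 0 (m : Int) 1).foldl (outerD depth ti tj)
      (PySem.Dict.empty, 0) with hR
    have hprev : ∀ i' : Int, max 0 ((m : Int) - 1 - tj) ≤ i' → i' ≤ min ((m : Int) - 1) ti →
        R.1.getD i' 0 = lev depth ti tj i' ((m : Int) - 1 - i') := ih2
    by_cases hne : max 0 ((m : Int) - tj) ≤ min (m : Int) ti + 1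
    · -- nonempty diagonal
      have hkful : max 0 ((m : Int) - tj)
          + (((min (m : Int) ti + 1 - max 0 ((m : Int) - tj)).toNat : Nat) : Int)
          = min (m : Int) ti + 1 := by omega
      obtain ⟨d1, d2⟩ := diagB_inv depth ti tj (m : Int) R.1 R.2 (by omega) hprev
        ((min (m : Int) ti + 1 - max 0 ((m : Int) - tj)).toNat) (by omega)
      rw [hkful] at d1 d2
      constructor
      · show (outerD depth ti tj R (m : Int)).2 = _
        unfold outerD
        rw [d1, List.map_append, List.sum_append, ih1]
        simp
      · intro i' h1 h2
        show (outerD depth ti tj R (m : Int)).1.getD i' 0 = _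
        unfold outerD
        have e : ((m + 1 : Nat) : Int) - 1 = (m : Int) := by omega
        rw [e] at h1 h2 ⊢
        exact d2 i' (by omega) (by omega)
    · -- empty diagonal
      have hnil : PySem.List.pyRange (max 0 ((m : Int) - tj)) (min (m : Int) ti + 1) 1 = [] :=
        PySem.List.pyRange_one_eq_nil (by omega)
      constructor
      · show (outerD depth ti tj R (m : Int)).2 = _
        unfold outerD
        rw [hnil, List.foldl_nil, List.map_append, List.sum_append, ih1]
        simp [hnil]
      · intro i' h1 h2
        exfalso
        have e : ((m + 1 : Nat) : Int) - 1 = (m : Int) := by omega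
        rw [e] at h1 h2
        omega

lemma part1_alt_eq_S (depth : Int) (t : Int × Int) (hti : 0 ≤ t.1) (htj : 0 ≤ t.2) :
    part1_alt depth t =
      ((PySem.List.pyRange 0 (t.1 + t.2 + 1) 1).map (fun d =>
        ((PySem.List.pyRange (max 0 (d - t.2)) (min d t.1 + 1) 1).map
          (fun i => PySem.Int.mod (lev depth t.1 t.2 i (d - i)) 3)).sum)).sum := by
  rw [part1_alt_eq depth t (by omega)]
  have hr : (((t.1 + t.2 + 1).toNat : Nat) : Int) = t.1 + t.2 + 1 := Int.toNat_of_nonneg (by omega)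
  obtain ⟨h1, _⟩ := outerD_inv depth t.1 t.2 ((t.1 + t.2 + 1).toNat) (le_of_eq hr)
  rw [hr] at h1
  exact h1

-- ---- sum reindexing: diagonals ↔ rectangle ----
lemma sum_map_range_int (g : Nat → Int) (n : Nat) :
    ((List.range n).map g).sum = ∑ k ∈ Finset.range n, g k := by
  induction n with
  | zero => simp
  | succ n ih =>
    rw [List.range_succ, List.map_append, List.sum_append, Finset.sum_range_succ, ih]
    simp

lemma sum_map_pyRange_int (f : Int → Int) (a b : Int) :
    ((PySem.List.pyRange a b 1).map f).sum = ∑ k ∈ Finset.range (b - a).toNat, f (a + (k : Int)) := by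
  rw [PySem.List.pyRange_one, List.map_map, sum_map_range_int]
  rfl

lemma diag_eq_rect (E : Int → Int → Int) (ti tj : Int) (hti : 0 ≤ ti) (htj : 0 ≤ tj) :
    ((PySem.List.pyRange 0 (ti + tj + 1) 1).map (fun d =>
        ((PySem.List.pyRange (max 0 (d - tj)) (min d ti + 1) 1).map (fun i => E i (d - i))).sum)).sum
    = ((PySem.List.pyRange 0 (ti + 1) 1).map (fun i =>
        ((PySem.List.pyRange 0 (tj + 1) 1).map (fun j => E i j)).sum)).sum := by
  have hL : ((PySem.List.pyRange 0 (ti + tj + 1) 1).map (fun d =>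
      ((PySem.List.pyRange (max 0 (d - tj)) (min d ti + 1) 1).map (fun i => E i (d - i))).sum)).sum
      = ∑ d ∈ Finset.range (ti + tj + 1).toNat,
          ∑ k ∈ Finset.range ((min (d : Int) ti + 1 - max 0 ((d : Int) - tj)).toNat),
            E (max 0 ((d : Int) - tj) + (k : Int)) ((d : Int) - (max 0 ((d : Int) - tj) + (k : Int))) := by
    rw [sum_map_pyRange_int]
    simp only [sub_zero, zero_add]
    apply Finset.sum_congr rfl
    intro d _
    rw [sum_map_pyRange_int]
  have hR : ((PySem.List.pyRange 0 (ti + 1) 1).map (fun i =>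
      ((PySem.List.pyRange 0 (tj + 1) 1).map (fun j => E i j)).sum)).sum
      = ∑ p ∈ Finset.range (ti + 1).toNat ×ˢ Finset.range (tj + 1).toNat,
          E (p.1 : Int) (p.2 : Int) := by
    rw [Finset.sum_product, sum_map_pyRange_int]
    simp only [sub_zero, zero_add]
    apply Finset.sum_congr rfl
    intro i _
    rw [sum_map_pyRange_int]
    simp only [sub_zero, zero_add]
  rw [hL, hR]
  rw [← Finset.sum_fiberwise_of_maps_to (g := fun p : Nat × Nat => p.1 + p.2)
      (t := Finset.range (ti + tj + 1).toNat)
      (by intro p hp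
          simp only [Finset.mem_product, Finset.mem_range] at hp
          simp only [Finset.mem_range]
          omega)]
  apply Finset.sum_congr rfl
  intro d hd
  simp only [Finset.mem_range] at hd
  apply Finset.sum_nbij' (i := fun k => ((((d : Int) - tj).toNat + k),
      (d - ((((d : Int) - tj).toNat) + k)))) (j := fun p => p.1 - (((d : Int) - tj).toNat))
  · intro k hk
    simp only [Finset.mem_range] at hk
    simp only [Finset.mem_filter, Finset.mem_product, Finset.mem_range]
    omega
  · intro p hp
    simp only [Finset.mem_filter, Finset.mem_product, Finset.mem_range] at hp
    simp only [Finset.mem_range]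
    omega
  · intro k hk
    simp only [Finset.mem_range] at hk
    omega
  · intro p hp
    simp only [Finset.mem_filter, Finset.mem_product, Finset.mem_range] at hp
    simp only [Prod.ext_iff]
    omega
  · intro k hk
    simp only [Finset.mem_range] at hk
    have e1 : max 0 ((d : Int) - tj) + (k : Int) = (((((d : Int) - tj).toNat) + k : Nat) : Int) := by
      push_cast; omega
    have e2 : (d : Int) - (((((d : Int) - tj).toNat + k : Nat)) : Int)
        = (((d - ((((d : Int) - tj).toNat) + k) : Nat)) : Int) := by omega
    rw [e1, e2]

-- ===== VERDICT (by name: the statement is the Claim_ definition above) =====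
theorem part1_spec : Claim_equal_part1 := by
  intro depth t _
  unfold Spec_part1
  by_cases hneg : t.1 < 0 ∨ t.2 < 0
  · rw [part1_eq_S, part1_alt_eq_zero depth t hneg]
    rcases hneg with h | h
    · rw [PySem.List.pyRange_one_eq_nil (by omega : t.1 + 1 ≤ 0)]
      simp
    · apply List.sum_eq_zero
      intro x hx
      rw [List.mem_map] at hx
      obtain ⟨i, _, rfl⟩ := hx
      rw [PySem.List.pyRange_one_eq_nil (by omega : t.2 + 1 ≤ 0)]
      simp
  · rw [part1_eq_S, part1_alt_eq_S depth t (by omega) (by omega)]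
    exact (diag_eq_rect (fun i j => PySem.Int.mod (lev depth t.1 t.2 i j) 3) t.1 t.2
      (by omega) (by omega)).symm
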